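-- pv_equiv track=rewrite | github.com/francosbenitez/unsam | 06-organizacion-y-complejidad/07-graficos/contar.py | busqueda_lineal_lordenada
-- ===== SOURCE A (Python) =====
-- def busqueda_lineal_lordenada(lista,e):
--     sorted_list = sorted(lista)
--     pos = -1
--     for i, z in enumerate(sorted_list):
--         if z == e:
--             pos = i
--             break
--     return pos
-- ===== SOURCE B (Python) =====
-- def busqueda_lineal_lordenada(lista, e):
--     # Single pass: the index of e in sorted(lista) is the number of elements < e.
--     menores = 0
--     presente = False
--     for x in lista:
--         if x < e:
--             menores += 1
--         elif x == e:
--             presente = True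
--     return menores if presente else -1
-- ===== Notes on version B (the rewrite author's own statement) =====
-- stated objective: alternative
-- what changed: Instead of sorting the list and scanning the sorted copy for e, B makes one counting pass (elements < e plus a presence flag); that count is exactly e's first index in the sorted copy.
import Mathlib
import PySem

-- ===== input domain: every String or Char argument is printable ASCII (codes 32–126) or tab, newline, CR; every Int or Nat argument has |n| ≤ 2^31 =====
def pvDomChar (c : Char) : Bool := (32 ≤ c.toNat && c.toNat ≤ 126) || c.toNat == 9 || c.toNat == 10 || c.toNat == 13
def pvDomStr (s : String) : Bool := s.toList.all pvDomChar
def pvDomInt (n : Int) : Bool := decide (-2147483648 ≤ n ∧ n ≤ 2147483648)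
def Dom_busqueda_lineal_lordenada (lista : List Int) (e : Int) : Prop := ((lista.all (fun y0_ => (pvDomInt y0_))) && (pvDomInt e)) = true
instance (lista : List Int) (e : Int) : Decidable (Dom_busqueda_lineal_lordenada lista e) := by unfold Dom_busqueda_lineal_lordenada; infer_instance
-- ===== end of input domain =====

-- B replaces sort-then-scan by a single counting pass (elements < e + a presence flag) that returns the same value by a different algorithm.


-- ===== PORT A =====
-- the 'for i, z in enumerate(sorted_list): if z == e: pos = i; break' loop:
-- structural recursion carrying the running index i
def pvGoA (e : Int) : List Int → Int → Int
  | [], _ => -1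
  | z :: rest, i => if z == e then i else pvGoA e rest (i + 1)

def busqueda_lineal_lordenada (lista : List Int) (e : Int) : Int :=
  let sorted_list := PySem.List.sorted lista (fun x => x) false
  pvGoA e sorted_list 0

-- ===== PORT B =====
-- single pass carrying the pair (menores, presente)
def busqueda_lineal_lordenada_alt (lista : List Int) (e : Int) : Int :=
  let st := lista.foldl
    (fun (st : Int × Bool) x =>
      if x < e then (st.1 + 1, st.2) else if x == e then (st.1, true) else st)
    (0, false)
  if st.2 then st.1 else -1

-- ===== PRECONDITION & SPEC =====
def Spec_busqueda_lineal_lordenada (lista : List Int) (e : Int) (out : Int) : Prop := out = busqueda_lineal_lordenada_alt lista e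
instance (lista : List Int) (e : Int) (out : Int) : Decidable (Spec_busqueda_lineal_lordenada lista e out) := by unfold Spec_busqueda_lineal_lordenada; infer_instance

-- ===== CLAIM (what is proved, stated in full; the proofs are below) =====
def Claim_equal_busqueda_lineal_lordenada : Prop := ∀ (lista : List Int) (e : Int), Dom_busqueda_lineal_lordenada lista e → Spec_busqueda_lineal_lordenada lista e (busqueda_lineal_lordenada lista e)

-- ===== LEMMAS AND PROOFS =====

-- A's scan of a sorted list: first index of e = i + #(elements < e), or -1 if absent
lemma goA_eq (e : Int) (s : List Int) (hs : s.Pairwise (· ≤ ·)) (i : Int) :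
    pvGoA e s i = if e ∈ s then i + (s.countP (fun x => decide (x < e)) : Int) else -1 := by
  induction s generalizing i with
  | nil => simp [pvGoA]
  | cons z rest ih =>
    rcases List.pairwise_cons.mp hs with ⟨hz, hrest⟩
    by_cases hze : z = e
    · subst hze
      have hc : rest.countP (fun x => decide (x < z)) = 0 := by
        rw [List.countP_eq_zero]
        intro x hx
        simpa using not_lt.mpr (hz x hx)
      simp [pvGoA, List.countP_cons, hc]
    · have : pvGoA e (z :: rest) i = pvGoA e rest (i + 1) := by
        simp [pvGoA, hze]
      rw [this, ih hrest]
      by_cases hmem : e ∈ rest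
      · have hzlt : z < e := lt_of_le_of_ne (hz e hmem) hze
        have : e ∈ z :: rest := List.mem_cons_of_mem _ hmem
        simp [hmem, this, List.countP_cons, hzlt]
        push_cast
        ring
      · have hne : e ∉ z :: rest := by
          simp only [List.mem_cons]
          push_neg
          exact ⟨fun h => hze h.symm, hmem⟩
        simp [hmem, hne]

-- B's fold invariant
lemma foldB_eq (e : Int) (l : List Int) (m : Int) (p : Bool) :
    l.foldl
      (fun (st : Int × Bool) x =>
        if x < e then (st.1 + 1, st.2) else if x == e then (st.1, true) else st)
      (m, p)
    = (m + (l.countP (fun x => decide (x < e)) : Int), p || decide (e ∈ l)) := by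
  induction l generalizing m p with
  | nil => simp
  | cons x rest ih =>
    rw [List.foldl_cons]
    by_cases hlt : x < e
    · rw [if_pos hlt, ih]
      have hne : e ≠ x := fun h => (ne_of_lt hlt) h.symm
      simp [List.countP_cons, List.mem_cons, hlt, hne]
      push_cast
      ring
    · rw [if_neg hlt]
      by_cases hxe : x = e
      · have hb : (x == e) = true := by simp [hxe]
        rw [hb, if_pos rfl, ih]
        subst hxe
        simp [List.countP_cons, List.mem_cons, hlt]
      · have hb : (x == e) = false := by simp [hxe]
        rw [hb]
        simp only [Bool.false_eq_true, if_false]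
        rw [ih]
        have hne : e ≠ x := fun h => hxe h.symm
        simp [List.countP_cons, List.mem_cons, hlt, hxe, hne]

-- ===== VERDICT (by name: the statement is the Claim_ definition above) =====
theorem busqueda_lineal_lordenada_spec : Claim_equal_busqueda_lineal_lordenada := by
  intro lista e _
  unfold Spec_busqueda_lineal_lordenada busqueda_lineal_lordenada busqueda_lineal_lordenada_alt
  simp only []
  show pvGoA e (PySem.List.sorted lista (fun x => x) false) 0 = _
  have hperm := PySem.List.sorted_perm (xs := lista) (key := fun x : Int => x) (rev := false)
  have hpair : (PySem.List.sorted lista (fun x => x) false).Pairwise (· ≤ ·) := by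
    simpa using PySem.List.sorted_pairwise (xs := lista) (key := fun x : Int => x)
  rw [goA_eq e _ hpair 0, foldB_eq]
  have hmem : e ∈ PySem.List.sorted lista (fun x => x) false ↔ e ∈ lista :=
    PySem.List.mem_sorted _ _ _ _
  have hcnt : (PySem.List.sorted lista (fun x => x) false).countP (fun x => decide (x < e))
      = lista.countP (fun x => decide (x < e)) := hperm.countP_eq _
  by_cases h : e ∈ lista
  · simp [h, hmem.mpr h, hcnt]
  · simp [h, hmem]
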